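-- pv_equiv track=rewrite | github.com/adaamko/surface_realization | surface/grammar.py | sanitize_word
-- ===== SOURCE A (Python) =====
-- REPLACE_MAP = {
--     ":": "COLON",
--     ",": "COMMA",
--     ".": "PERIOD",
--     ";": "SEMICOLON",
--     "-": "HYPHEN",
--     "_": "DASH",
--     "[": "LSB",
--     "]": "RSB",
--     "(": "LRB",
--     ")": "RRB",
--     "{": "LCB",
--     "}": "RCB",
--     "!": "EXC",
--     "?": "QUE",
--     "'": "SQ",
--     '"': "DQ",
--     "/": "PER",
--     "\\": "BSL",
--     "#": "HASHTAG",
--     "%": "PERCENT",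
--     "&": "ET",
--     "@": "AT",
--     "$": "DOLLAR",
--     "*": "ASTERISK",
--     "^": "CAP",
--     "`": "IQ",
--     "+": "PLUS",
--     "|": "PIPE",
--     "~": "TILDE",
--     "<": "LESS",
--     ">": "MORE",
--     "=": "EQ"
-- }
--
-- KEYWORDS = set(["feature"])
--
-- def sanitize_word(word):
--     for pattern, target in REPLACE_MAP.items():
--         word = word.replace(pattern, target)
--     for digit in "0123456789":
--         word = word.replace(digit, "DIGIT")
--     if word in KEYWORDS:
--         word = word.upper()
--     return word
-- ===== SOURCE B (Python) =====
-- REPLACE_MAP = {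
--     ":": "COLON", ",": "COMMA", ".": "PERIOD", ";": "SEMICOLON", "-": "HYPHEN",
--     "_": "DASH", "[": "LSB", "]": "RSB", "(": "LRB", ")": "RRB", "{": "LCB",
--     "}": "RCB", "!": "EXC", "?": "QUE", "'": "SQ", '"': "DQ", "/": "PER",
--     "\\": "BSL", "#": "HASHTAG", "%": "PERCENT", "&": "ET", "@": "AT",
--     "$": "DOLLAR", "*": "ASTERISK", "^": "CAP", "`": "IQ", "+": "PLUS",
--     "|": "PIPE", "~": "TILDE", "<": "LESS", ">": "MORE", "=": "EQ",
-- }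
--
-- KEYWORDS = set(["feature"])
--
-- _TABLE = dict(REPLACE_MAP)
-- for _d in "0123456789":
--     _TABLE[_d] = "DIGIT"
--
--
-- def sanitize_word(word):
--     out = "".join(_TABLE.get(ch, ch) for ch in word)
--     if out in KEYWORDS:
--         out = out.upper()
--     return out
-- ===== Notes on version B (the rewrite author's own statement) =====
-- stated objective: alternative
-- what changed: Replaces A's 42 sequential full-string str.replace scans with a single character-by-character pass over the word using one lookup table (REPLACE_MAP plus each digit mapped to 'DIGIT'), joined once; the keyword-uppercase check is unchanged. In CPython the C-level str.replace chain is still faster, so no speed is claimed.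
import Mathlib
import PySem

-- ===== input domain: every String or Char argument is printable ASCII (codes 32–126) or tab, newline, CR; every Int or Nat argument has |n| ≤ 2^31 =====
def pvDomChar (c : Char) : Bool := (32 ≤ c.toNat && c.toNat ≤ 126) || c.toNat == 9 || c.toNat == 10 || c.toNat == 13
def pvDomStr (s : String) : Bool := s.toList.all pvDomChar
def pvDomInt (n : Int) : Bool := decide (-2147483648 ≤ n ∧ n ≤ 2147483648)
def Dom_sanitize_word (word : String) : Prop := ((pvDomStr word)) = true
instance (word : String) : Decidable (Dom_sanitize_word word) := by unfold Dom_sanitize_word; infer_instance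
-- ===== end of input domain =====

-- B (alternative decomposition): one per-character pass over a single lookup table
-- (REPLACE_MAP plus digits → "DIGIT") joined once, instead of A's 42 sequential full-string
-- .replace passes; same keyword uppercasing. No speed is claimed.

-- ===== PORT A =====
def REPLACE_MAP : List (String × String) := [(":", "COLON"), (",", "COMMA"), (".", "PERIOD"), (";", "SEMICOLON"), ("-", "HYPHEN"), ("_", "DASH"), ("[", "LSB"), ("]", "RSB"), ("(", "LRB"), (")", "RRB"), ("{", "LCB"), ("}", "RCB"), ("!", "EXC"), ("?", "QUE"), ("'", "SQ"), ("\"", "DQ"), ("/", "PER"), ("\\", "BSL"), ("#", "HASHTAG"), ("%", "PERCENT"), ("&", "ET"), ("@", "AT"), ("$", "DOLLAR"), ("*", "ASTERISK"), ("^", "CAP"), ("`", "IQ"), ("+", "PLUS"), ("|", "PIPE"), ("~", "TILDE"), ("<", "LESS"), (">", "MORE"), ("=", "EQ")]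

def KEYWORDS : PySem.Set String := PySem.Set.ofList ["feature"]

def sanitize_word (word : String) : String :=
  let w1 := REPLACE_MAP.foldl (fun w pt => PySem.Str.replace w pt.1 pt.2) word
  let w2 := ("0123456789" : String).toList.foldl
    (fun w d => PySem.Str.replace w (String.singleton d) "DIGIT") w1
  if PySem.Set.contains KEYWORDS w2 then PySem.Str.upper w2 else w2

-- ===== PORT B =====
-- _TABLE = dict(REPLACE_MAP) with every digit then mapped to "DIGIT" (written out as the finished dict)
def pvTable : PySem.Dict Char String := ⟨[(':', "COLON"),
  (',', "COMMA"),
  ('.', "PERIOD"),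
  (';', "SEMICOLON"),
  ('-', "HYPHEN"),
  ('_', "DASH"),
  ('[', "LSB"),
  (']', "RSB"),
  ('(', "LRB"),
  (')', "RRB"),
  ('{', "LCB"),
  ('}', "RCB"),
  ('!', "EXC"),
  ('?', "QUE"),
  ('\'', "SQ"),
  ('"', "DQ"),
  ('/', "PER"),
  ('\\', "BSL"),
  ('#', "HASHTAG"),
  ('%', "PERCENT"),
  ('&', "ET"),
  ('@', "AT"),
  ('$', "DOLLAR"),
  ('*', "ASTERISK"),
  ('^', "CAP"),
  ('`', "IQ"),
  ('+', "PLUS"),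
  ('|', "PIPE"),
  ('~', "TILDE"),
  ('<', "LESS"),
  ('>', "MORE"),
  ('=', "EQ"),
  ('0', "DIGIT"),
  ('1', "DIGIT"),
  ('2', "DIGIT"),
  ('3', "DIGIT"),
  ('4', "DIGIT"),
  ('5', "DIGIT"),
  ('6', "DIGIT"),
  ('7', "DIGIT"),
  ('8', "DIGIT"),
  ('9', "DIGIT")]⟩

def sanitize_word_alt (word : String) : String :=
  let out := PySem.Str.join "" (word.toList.map (fun ch => PySem.Dict.getD pvTable ch (String.singleton ch)))
  if PySem.Set.contains KEYWORDS out then PySem.Str.upper out else out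

-- ===== PRECONDITION & SPEC =====
def Spec_sanitize_word (word : String) (out : String) : Prop := out = sanitize_word_alt word
instance (word : String) (out : String) : Decidable (Spec_sanitize_word word out) := by unfold Spec_sanitize_word; infer_instance

-- ===== CLAIM (what is proved, stated in full; the proofs are below) =====
def Claim_equal_sanitize_word : Prop := ∀ (word : String), Dom_sanitize_word word → Spec_sanitize_word word (sanitize_word word)

-- ===== LEMMAS AND PROOFS =====

/-- Joining with the empty separator is concatenation. -/
theorem join_nil_eq_flatten (parts : List (List Char)) : PySem.Chars.join [] parts = parts.flatten := by
  simp [PySem.Chars.join, List.intercalate]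
  induction parts with
  | nil => rfl
  | cons p ps ih => cases ps <;> simp_all [List.intersperse]

/-- Replacing a single-character pattern acts independently on each character. -/
theorem replace_single (s : List Char) (c : Char) (t : List Char) :
    PySem.Chars.replace s [c] t = s.flatMap (fun ch => if ch = c then t else [ch]) := by
  have go : ∀ fuel (l acc : List Char), l.length ≤ fuel →
      PySem.Chars.replace.go [c] t fuel l acc
        = acc.reverse ++ l.flatMap (fun ch => if ch = c then t else [ch]) := by
    intro fuel
    induction fuel with
    | zero => intro l acc h; cases l with
      | nil => rfl
      | cons x xs => simp at h
    | succ n ih =>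
      intro l acc h
      cases l with
      | nil => simp [PySem.Chars.replace.go]
      | cons x xs =>
        simp only [PySem.Chars.replace.go]
        by_cases hx : x = c
        · subst hx
          simp [List.isPrefixOf, ih xs _ (by simpa using h)]
        · simp [List.isPrefixOf, hx, Ne.symm hx, ih xs _ (by simpa using h)]
  simp [PySem.Chars.replace, go s.length s [] (le_refl _)]

/-- The string both programs feed to the keyword check is the same. -/
theorem pre_keyword_eq (word : String) :
    ("0123456789" : String).toList.foldl
        (fun w d => PySem.Str.replace w (String.singleton d) "DIGIT")
        (REPLACE_MAP.foldl (fun w pt => PySem.Str.replace w pt.1 pt.2) word)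
    = PySem.Str.join "" (word.toList.map (fun ch => PySem.Dict.getD pvTable ch (String.singleton ch))) := by
  apply String.toList_inj.mp
  simp only [REPLACE_MAP, List.foldl_cons, List.foldl_nil,
    show ("0123456789" : String).toList = ['0','1','2','3','4','5','6','7','8','9'] from rfl]
  simp only [PySem.Str.toList_replace, PySem.Str.toList_join,
    show (":" : String).toList = [':'] from rfl,
    show ("," : String).toList = [','] from rfl,
    show ("." : String).toList = ['.'] from rfl,
    show (";" : String).toList = [';'] from rfl,
    show ("-" : String).toList = ['-'] from rfl,
    show ("_" : String).toList = ['_'] from rfl,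
    show ("[" : String).toList = ['['] from rfl,
    show ("]" : String).toList = [']'] from rfl,
    show ("(" : String).toList = ['('] from rfl,
    show (")" : String).toList = [')'] from rfl,
    show ("{" : String).toList = ['{'] from rfl,
    show ("}" : String).toList = ['}'] from rfl,
    show ("!" : String).toList = ['!'] from rfl,
    show ("?" : String).toList = ['?'] from rfl,
    show ("'" : String).toList = ['\''] from rfl,
    show ("\"" : String).toList = ['"'] from rfl,
    show ("/" : String).toList = ['/'] from rfl,
    show ("\\" : String).toList = ['\\'] from rfl,
    show ("#" : String).toList = ['#'] from rfl,
    show ("%" : String).toList = ['%'] from rfl,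
    show ("&" : String).toList = ['&'] from rfl,
    show ("@" : String).toList = ['@'] from rfl,
    show ("$" : String).toList = ['$'] from rfl,
    show ("*" : String).toList = ['*'] from rfl,
    show ("^" : String).toList = ['^'] from rfl,
    show ("`" : String).toList = ['`'] from rfl,
    show ("+" : String).toList = ['+'] from rfl,
    show ("|" : String).toList = ['|'] from rfl,
    show ("~" : String).toList = ['~'] from rfl,
    show ("<" : String).toList = ['<'] from rfl,
    show (">" : String).toList = ['>'] from rfl,
    show ("=" : String).toList = ['='] from rfl,
    show (String.singleton '0').toList = ['0'] from rfl,
    show (String.singleton '1').toList = ['1'] from rfl,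
    show (String.singleton '2').toList = ['2'] from rfl,
    show (String.singleton '3').toList = ['3'] from rfl,
    show (String.singleton '4').toList = ['4'] from rfl,
    show (String.singleton '5').toList = ['5'] from rfl,
    show (String.singleton '6').toList = ['6'] from rfl,
    show (String.singleton '7').toList = ['7'] from rfl,
    show (String.singleton '8').toList = ['8'] from rfl,
    show (String.singleton '9').toList = ['9'] from rfl]
  simp only [replace_single, List.flatMap_assoc]
  rw [show ("" : String).toList = [] from rfl, List.map_map, join_nil_eq_flatten,
    ← List.flatMap_def]
  apply List.flatMap_congr
  intro c _
  by_cases h0 : c = ':'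
  · subst h0; decide
  by_cases h1 : c = ','
  · subst h1; decide
  by_cases h2 : c = '.'
  · subst h2; decide
  by_cases h3 : c = ';'
  · subst h3; decide
  by_cases h4 : c = '-'
  · subst h4; decide
  by_cases h5 : c = '_'
  · subst h5; decide
  by_cases h6 : c = '['
  · subst h6; decide
  by_cases h7 : c = ']'
  · subst h7; decide
  by_cases h8 : c = '('
  · subst h8; decide
  by_cases h9 : c = ')'
  · subst h9; decide
  by_cases h10 : c = '{'
  · subst h10; decide
  by_cases h11 : c = '}'
  · subst h11; decide
  by_cases h12 : c = '!'
  · subst h12; decide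
  by_cases h13 : c = '?'
  · subst h13; decide
  by_cases h14 : c = '\''
  · subst h14; decide
  by_cases h15 : c = '"'
  · subst h15; decide
  by_cases h16 : c = '/'
  · subst h16; decide
  by_cases h17 : c = '\\'
  · subst h17; decide
  by_cases h18 : c = '#'
  · subst h18; decide
  by_cases h19 : c = '%'
  · subst h19; decide
  by_cases h20 : c = '&'
  · subst h20; decide
  by_cases h21 : c = '@'
  · subst h21; decide
  by_cases h22 : c = '$'
  · subst h22; decide
  by_cases h23 : c = '*'
  · subst h23; decide
  by_cases h24 : c = '^'
  · subst h24; decide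
  by_cases h25 : c = '`'
  · subst h25; decide
  by_cases h26 : c = '+'
  · subst h26; decide
  by_cases h27 : c = '|'
  · subst h27; decide
  by_cases h28 : c = '~'
  · subst h28; decide
  by_cases h29 : c = '<'
  · subst h29; decide
  by_cases h30 : c = '>'
  · subst h30; decide
  by_cases h31 : c = '='
  · subst h31; decide
  by_cases h32 : c = '0'
  · subst h32; decide
  by_cases h33 : c = '1'
  · subst h33; decide
  by_cases h34 : c = '2'
  · subst h34; decide
  by_cases h35 : c = '3'
  · subst h35; decide
  by_cases h36 : c = '4'
  · subst h36; decide
  by_cases h37 : c = '5'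
  · subst h37; decide
  by_cases h38 : c = '6'
  · subst h38; decide
  by_cases h39 : c = '7'
  · subst h39; decide
  by_cases h40 : c = '8'
  · subst h40; decide
  by_cases h41 : c = '9'
  · subst h41; decide
  simp [pvTable, PySem.Dict.getD, PySem.Dict.get?, List.find?, Function.comp, String.singleton, h0, show (':' == c) = false from by simp [Ne.symm h0],
    h1, show (',' == c) = false from by simp [Ne.symm h1],
    h2, show ('.' == c) = false from by simp [Ne.symm h2],
    h3, show (';' == c) = false from by simp [Ne.symm h3],
    h4, show ('-' == c) = false from by simp [Ne.symm h4],
    h5, show ('_' == c) = false from by simp [Ne.symm h5],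
    h6, show ('[' == c) = false from by simp [Ne.symm h6],
    h7, show (']' == c) = false from by simp [Ne.symm h7],
    h8, show ('(' == c) = false from by simp [Ne.symm h8],
    h9, show (')' == c) = false from by simp [Ne.symm h9],
    h10, show ('{' == c) = false from by simp [Ne.symm h10],
    h11, show ('}' == c) = false from by simp [Ne.symm h11],
    h12, show ('!' == c) = false from by simp [Ne.symm h12],
    h13, show ('?' == c) = false from by simp [Ne.symm h13],
    h14, show ('\'' == c) = false from by simp [Ne.symm h14],
    h15, show ('"' == c) = false from by simp [Ne.symm h15],
    h16, show ('/' == c) = false from by simp [Ne.symm h16],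
    h17, show ('\\' == c) = false from by simp [Ne.symm h17],
    h18, show ('#' == c) = false from by simp [Ne.symm h18],
    h19, show ('%' == c) = false from by simp [Ne.symm h19],
    h20, show ('&' == c) = false from by simp [Ne.symm h20],
    h21, show ('@' == c) = false from by simp [Ne.symm h21],
    h22, show ('$' == c) = false from by simp [Ne.symm h22],
    h23, show ('*' == c) = false from by simp [Ne.symm h23],
    h24, show ('^' == c) = false from by simp [Ne.symm h24],
    h25, show ('`' == c) = false from by simp [Ne.symm h25],
    h26, show ('+' == c) = false from by simp [Ne.symm h26],
    h27, show ('|' == c) = false from by simp [Ne.symm h27],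
    h28, show ('~' == c) = false from by simp [Ne.symm h28],
    h29, show ('<' == c) = false from by simp [Ne.symm h29],
    h30, show ('>' == c) = false from by simp [Ne.symm h30],
    h31, show ('=' == c) = false from by simp [Ne.symm h31],
    h32, show ('0' == c) = false from by simp [Ne.symm h32],
    h33, show ('1' == c) = false from by simp [Ne.symm h33],
    h34, show ('2' == c) = false from by simp [Ne.symm h34],
    h35, show ('3' == c) = false from by simp [Ne.symm h35],
    h36, show ('4' == c) = false from by simp [Ne.symm h36],
    h37, show ('5' == c) = false from by simp [Ne.symm h37],
    h38, show ('6' == c) = false from by simp [Ne.symm h38],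
    h39, show ('7' == c) = false from by simp [Ne.symm h39],
    h40, show ('8' == c) = false from by simp [Ne.symm h40],
    h41, show ('9' == c) = false from by simp [Ne.symm h41]]

-- ===== VERDICT (by name: the statement is the Claim_ definition above) =====
theorem sanitize_word_spec : Claim_equal_sanitize_word := by
  intro word _
  unfold Spec_sanitize_word sanitize_word sanitize_word_alt
  simp only [pre_keyword_eq word]
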